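-- pv_equiv track=rewrite | github.com/shravyabot/LocalLens | src/locallens/service.py | _default_topic_from_activity_types
-- ===== SOURCE A (Python) =====
-- def _default_topic_from_activity_types(activity_types: list[str]) -> str:
--     if not activity_types:
--         return ""
--     priority = [
--         ("hidden_gems", "hidden_gems"),
--         ("newcomer_advice", "newcomer_advice"),
--         ("local_customs", "local_customs"),
--         ("neighborhood_vibe", "neighborhood_vibe"),
--         ("scenic", "scenic"),
--         ("nightlife", "nightlife"),
--         ("outdoors", "outdoors"),
--         ("family", "family"),
--     ]
--     for activity_type, topic in priority:
--         if activity_type in activity_types: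
--             return topic
--     return "activities"
-- ===== SOURCE B (Python) =====
-- _KEYS = [
--     "hidden_gems",
--     "newcomer_advice",
--     "local_customs",
--     "neighborhood_vibe",
--     "scenic",
--     "nightlife",
--     "outdoors",
--     "family",
-- ]
--
--
-- def _default_topic_from_activity_types(activity_types: list[str]) -> str:
--     if not activity_types:
--         return ""
--     rank = {t: i for i, t in enumerate(_KEYS)}
--     ranks = [rank[a] for a in activity_types if a in rank]
--     return _KEYS[min(ranks)] if ranks else "activities"
-- ===== Notes on version B (the rewrite author's own statement) =====
-- stated objective: idiomatic
-- what changed: B builds a topic->index rank dict once, collects in a single pass over activity_types the ranks of the types present in it, and returns the key at the minimum rank, instead of A's ordered first-match scan over the priority list with an inner membership test of each priority key against activity_types.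
import Mathlib
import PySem

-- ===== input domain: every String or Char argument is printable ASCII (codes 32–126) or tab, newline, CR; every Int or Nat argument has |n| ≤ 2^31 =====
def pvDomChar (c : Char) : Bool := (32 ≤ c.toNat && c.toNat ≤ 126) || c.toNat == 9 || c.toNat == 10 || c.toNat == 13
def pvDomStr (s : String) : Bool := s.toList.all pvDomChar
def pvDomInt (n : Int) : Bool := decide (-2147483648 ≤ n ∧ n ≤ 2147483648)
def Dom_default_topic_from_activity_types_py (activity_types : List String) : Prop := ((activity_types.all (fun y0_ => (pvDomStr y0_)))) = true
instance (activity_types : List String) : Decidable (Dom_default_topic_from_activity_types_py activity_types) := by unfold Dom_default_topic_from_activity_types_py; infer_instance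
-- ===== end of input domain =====

-- B replaces A's ordered first-match scan over the priority list by one pass over
-- activity_types collecting ranks from a precomputed key→index dict, returning the
-- key at the minimum rank (objective: idiomatic).

-- ===== PORT A =====
def pvPriority : List (String × String) :=
  [("hidden_gems", "hidden_gems"),
   ("newcomer_advice", "newcomer_advice"),
   ("local_customs", "local_customs"),
   ("neighborhood_vibe", "neighborhood_vibe"),
   ("scenic", "scenic"),
   ("nightlife", "nightlife"),
   ("outdoors", "outdoors"),
   ("family", "family")]

-- the 'for activity_type, topic in priority' loop of A
def pvALoop (priority : List (String × String)) (xs : List String) : String :=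
  match priority with
  | [] => "activities"
  | (activity_type, topic) :: rest =>
      if xs.contains activity_type then topic else pvALoop rest xs

def default_topic_from_activity_types_py (activity_types : List String) : String :=
  if activity_types = [] then "" else pvALoop pvPriority activity_types

-- ===== PORT B =====
def pvKeys : List String :=
  ["hidden_gems", "newcomer_advice", "local_customs", "neighborhood_vibe",
   "scenic", "nightlife", "outdoors", "family"]

-- rank = {t: i for i, t in enumerate(_KEYS)}
def pvRank : PySem.Dict String Int :=
  PySem.Dict.ofList ((PySem.List.enumerate pvKeys).map (fun p => (p.2, p.1)))

def default_topic_from_activity_types_py_alt (activity_types : List String) : String :=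
  if activity_types = [] then ""
  else
    -- ranks = [rank[a] for a in activity_types if a in rank]
    let ranks : List Int := activity_types.filterMap (fun a => pvRank.get? a)
    -- _KEYS[min(ranks)] if ranks else "activities"
    match PySem.List.min? ranks (fun x => x) with
    | some m => PySem.List.pyGetD pvKeys m ""
    | none => "activities"

-- ===== PRECONDITION & SPEC =====
def Spec_default_topic_from_activity_types_py (activity_types : List String) (out : String) : Prop := out = default_topic_from_activity_types_py_alt activity_types
instance (activity_types : List String) (out : String) : Decidable (Spec_default_topic_from_activity_types_py activity_types out) := by unfold Spec_default_topic_from_activity_types_py; infer_instance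

-- ===== CLAIM (what is proved, stated in full; the proofs are below) =====
def Claim_equal_default_topic_from_activity_types_py : Prop := ∀ (activity_types : List String), Dom_default_topic_from_activity_types_py activity_types → Spec_default_topic_from_activity_types_py activity_types (default_topic_from_activity_types_py activity_types)

-- ===== LEMMAS AND PROOFS =====

-- the ranks B collects, expressed via index? for a generic key list
def pvRanksOf (keys xs : List String) : List Int :=
  xs.filterMap (fun a => (PySem.List.index? keys a).map (fun n => (n : Int)))

-- min? with the identity key is pinned by membership + minimality (the value is unique)
theorem pv_min?_id_eq_some (l : List Int) (m : Int) (h1 : m ∈ l)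
    (h2 : ∀ y ∈ l, m ≤ y) : PySem.List.min? l (fun x => x) = some m := by
  cases hm : PySem.List.min? l (fun x => x) with
  | none =>
      rw [PySem.List.min?_eq_none_iff] at hm
      subst hm; cases h1
  | some m' =>
      have h3 : m' ≤ m := by simpa using PySem.List.min?_isMin hm m h1
      have h4 : m ≤ m' := h2 m' (PySem.List.min?_mem hm)
      exact congrArg some (le_antisymm h3 h4)

theorem pv_index?_cons (x v : String) (xs : List String) :
    PySem.List.index? (x :: xs) v =
      if x = v then some 0 else (PySem.List.index? xs v).map (· + 1) := by
  by_cases h : x = v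
  · subst h; rw [if_pos rfl]; exact PySem.List.index?_cons_self x xs
  · rw [if_neg h]; exact PySem.List.index?_cons_of_ne xs h

theorem pv_ranksOf_nil (xs : List String) : pvRanksOf [] xs = [] := by
  simp [pvRanksOf, PySem.List.index?_eq_idxOf?]

theorem pv_ranksOf_cons_not_mem {k : String} {xs : List String} (ks : List String)
    (hk : k ∉ xs) : pvRanksOf (k :: ks) xs = (pvRanksOf ks xs).map (· + 1) := by
  unfold pvRanksOf
  rw [List.map_filterMap]
  refine List.filterMap_congr ?_
  intro a ha
  have hne : k ≠ a := fun he => hk (he ▸ ha)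
  rw [pv_index?_cons, if_neg hne]
  cases PySem.List.index? ks a with
  | none => rfl
  | some n => simp

theorem pv_zero_mem_ranksOf {k : String} {xs : List String} (ks : List String)
    (hk : k ∈ xs) : (0 : Int) ∈ pvRanksOf (k :: ks) xs := by
  refine List.mem_filterMap.mpr ⟨k, hk, ?_⟩
  rw [PySem.List.index?_cons_self]; rfl

theorem pv_ranksOf_nonneg (keys xs : List String) :
    ∀ y ∈ pvRanksOf keys xs, (0 : Int) ≤ y := by
  intro y hy
  rcases List.mem_filterMap.mp hy with ⟨a, _, ha⟩
  cases hidx : PySem.List.index? keys a with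
  | none => rw [hidx] at ha; cases ha
  | some n =>
      rw [hidx] at ha
      simp at ha
      omega

theorem pv_ranksOf_cast (keys xs : List String) :
    ∀ y ∈ pvRanksOf keys xs, ∃ n : Nat, y = (n : Int) := by
  intro y hy
  rcases List.mem_filterMap.mp hy with ⟨a, _, ha⟩
  cases hidx : PySem.List.index? keys a with
  | none => rw [hidx] at ha; cases ha
  | some n =>
      rw [hidx] at ha
      simp at ha
      exact ⟨n, ha.symm⟩

-- the generic core: A's first-match scan over keys equals B's min-rank selection
theorem pv_core (keys xs : List String) :
    pvALoop (keys.map (fun k => (k, k))) xs =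
      (match PySem.List.min? (pvRanksOf keys xs) (fun x => x) with
        | some m => PySem.List.pyGetD keys m ""
        | none => "activities") := by
  induction keys with
  | nil => rw [pv_ranksOf_nil]; simp [pvALoop, PySem.List.min?]
  | cons k ks ih =>
      by_cases hk : k ∈ xs
      · rw [pv_min?_id_eq_some _ 0 (pv_zero_mem_ranksOf ks hk) (pv_ranksOf_nonneg _ xs)]
        simp [pvALoop, hk]
      · have hstep : pvALoop ((k :: ks).map (fun k => (k, k))) xs
            = pvALoop (ks.map (fun k => (k, k))) xs := by
          simp [pvALoop, List.contains_eq_mem, hk]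
        rw [hstep, ih, pv_ranksOf_cons_not_mem ks hk]
        cases hb : PySem.List.min? (pvRanksOf ks xs) (fun x => x) with
        | none =>
            rw [PySem.List.min?_eq_none_iff] at hb
            rw [hb]
            simp [PySem.List.min?]
        | some m =>
            have hmem := PySem.List.min?_mem hb
            have hmin := PySem.List.min?_isMin hb
            have h1 : m + 1 ∈ (pvRanksOf ks xs).map (· + 1) :=
              List.mem_map.mpr ⟨m, hmem, rfl⟩
            have h2 : ∀ y ∈ (pvRanksOf ks xs).map (· + 1), m + 1 ≤ y := by
              intro y hy
              rcases List.mem_map.mp hy with ⟨b, hb', rfl⟩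
              have : m ≤ b := by simpa using hmin b hb'
              omega
            rw [pv_min?_id_eq_some _ (m + 1) h1 h2]
            rcases pv_ranksOf_cast ks xs m hmem with ⟨n, rfl⟩
            have hc : ((n : Int) + 1) = (((n + 1 : Nat)) : Int) := by push_cast; ring
            show PySem.List.pyGetD ks (↑n) "" = PySem.List.pyGetD (k :: ks) (↑n + 1) ""
            rw [hc, PySem.List.pyGetD_natCast, PySem.List.pyGetD_natCast]
            simp

theorem pv_priority_eq : pvPriority = pvKeys.map (fun k => (k, k)) := by
  simp [pvPriority, pvKeys]

theorem pv_rank_get? (a : String) :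
    pvRank.get? a = (PySem.List.index? pvKeys a).map (fun n => (n : Int)) := by
  have hlit : pvRank = PySem.Dict.mk
      [("hidden_gems", 0), ("newcomer_advice", 1), ("local_customs", 2),
       ("neighborhood_vibe", 3), ("scenic", 4), ("nightlife", 5),
       ("outdoors", 6), ("family", 7)] := by rfl
  rw [hlit]
  simp only [pvKeys, pv_index?_cons, PySem.Dict.get?_mk_cons, beq_iff_eq]
  split_ifs <;> simp [PySem.Dict.get?, PySem.List.index?_eq_idxOf?]

theorem pv_ranks_eq (xs : List String) :
    xs.filterMap (fun a => pvRank.get? a) = pvRanksOf pvKeys xs := by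
  unfold pvRanksOf
  exact List.filterMap_congr (fun a _ => pv_rank_get? a)

-- ===== VERDICT (by name: the statement is the Claim_ definition above) =====
theorem default_topic_from_activity_types_py_spec : Claim_equal_default_topic_from_activity_types_py := by
  intro xs _
  unfold Spec_default_topic_from_activity_types_py
  unfold default_topic_from_activity_types_py default_topic_from_activity_types_py_alt
  by_cases hxs : xs = []
  · simp [hxs]
  · simp only [hxs, if_false]
    rw [pv_ranks_eq, pv_priority_eq, pv_core]
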